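-- pv_equiv track=rewrite | github.com/osKlonowski/BachelorThesis | divide_sections.py | getSectionSizeDiff
-- ===== SOURCE A (Python) =====
-- def getSize(element):
--     return len(element)
--
-- def getSectionSizeDiff(divisions):
--     listSizes = list(map(getSize, divisions))
--     max_diff = 0
--     for i in range(0, len(listSizes)):
--         for j in range(0, len(listSizes)):
--             # i => 0
--             # j => 0, 1, 2
--             diff = listSizes[i] - listSizes[j]
--             if diff > max_diff:
--                 max_diff = diff
--     return max_diff
-- ===== SOURCE B (Python) =====
-- def getSectionSizeDiff(divisions):
--     sizes = [len(e) for e in divisions]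
--     if not sizes:
--         return 0
--     s = sorted(sizes)
--     return s[-1] - s[0]
-- ===== Notes on version B (the rewrite author's own statement) =====
-- stated objective: faster
-- what changed: Replaces A's O(n^2) nested pairwise difference scan with computing the size list once, sorting it, and returning last element minus first.
import Mathlib
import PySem

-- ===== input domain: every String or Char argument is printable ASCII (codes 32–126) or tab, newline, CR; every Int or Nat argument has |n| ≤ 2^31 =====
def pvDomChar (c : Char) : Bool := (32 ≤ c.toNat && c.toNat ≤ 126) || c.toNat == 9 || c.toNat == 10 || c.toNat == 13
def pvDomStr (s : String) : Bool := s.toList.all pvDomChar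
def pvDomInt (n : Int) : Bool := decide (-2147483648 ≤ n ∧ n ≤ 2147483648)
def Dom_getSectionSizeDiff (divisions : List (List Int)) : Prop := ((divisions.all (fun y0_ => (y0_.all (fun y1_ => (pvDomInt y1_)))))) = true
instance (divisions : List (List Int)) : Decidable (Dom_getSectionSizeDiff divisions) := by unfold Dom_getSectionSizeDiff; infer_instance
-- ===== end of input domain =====

-- B computes the size list once, sorts it and returns last-minus-first instead of A's nested pairwise scan.

-- ===== PORT A =====
def getSectionSizeDiff (divisions : List (List Int)) : Int :=
  let listSizes := divisions.map (fun e => (e.length : Int))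
  (PySem.List.pyRange 0 (listSizes.length : Int) 1).foldl (fun max_diff i =>
    (PySem.List.pyRange 0 (listSizes.length : Int) 1).foldl (fun max_diff j =>
      -- listSizes[i] - listSizes[j]: i, j come from range(len(listSizes)), always in range
      let diff := PySem.List.pyGetD listSizes i 0 - PySem.List.pyGetD listSizes j 0
      if diff > max_diff then diff else max_diff) max_diff) 0

-- ===== PORT B =====
def getSectionSizeDiff_alt (divisions : List (List Int)) : Int :=
  let sizes := divisions.map (fun e => (e.length : Int))
  if sizes.isEmpty then 0
  else
    let s := PySem.List.sorted sizes (fun x => x) false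
    -- s[-1] and s[0]: s is nonempty here, so both indexes are in range
    PySem.List.pyGetD s (-1) 0 - PySem.List.pyGetD s 0 0

-- ===== PRECONDITION & SPEC =====
def Spec_getSectionSizeDiff (divisions : List (List Int)) (out : Int) : Prop := out = getSectionSizeDiff_alt divisions
instance (divisions : List (List Int)) (out : Int) : Decidable (Spec_getSectionSizeDiff divisions out) := by unfold Spec_getSectionSizeDiff; infer_instance

-- ===== CLAIM (what is proved, stated in full; the proofs are below) =====
def Claim_equal_getSectionSizeDiff : Prop := ∀ (divisions : List (List Int)), Dom_getSectionSizeDiff divisions → Spec_getSectionSizeDiff divisions (getSectionSizeDiff divisions)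

-- ===== LEMMAS AND PROOFS =====

-- a max-accumulating fold does not move when nothing exceeds the accumulator
theorem pv_foldl_max_const (g : Int → Int) (ys : List Int) (acc : Int)
    (h : ∀ y ∈ ys, g y ≤ acc) :
    ys.foldl (fun a y => max a (g y)) acc = acc := by
  induction ys with
  | nil => rfl
  | cons y t ih =>
    have hy : g y ≤ acc := h y (by simp)
    have hmax : max acc (g y) = acc := by omega
    simp only [List.foldl_cons, hmax]
    exact ih (fun z hz => h z (by simp [hz]))

-- a max-accumulating fold whose supremum G is attained equals max acc G
theorem pv_foldl_max_attained (g : Int → Int) (ys : List Int) (G : Int)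
    (hmem : ∃ y ∈ ys, g y = G) (hub : ∀ y ∈ ys, g y ≤ G) (acc : Int) :
    ys.foldl (fun a y => max a (g y)) acc = max acc G := by
  induction ys generalizing acc with
  | nil => exact absurd hmem (by simp)
  | cons y t ih =>
    simp only [List.foldl_cons]
    by_cases hm : ∃ z ∈ t, g z = G
    · rw [ih hm (fun z hz => hub z (by simp [hz]))]
      have : g y ≤ G := hub y (by simp)
      omega
    · have hyG : g y = G := by
        rcases hmem with ⟨z, hz, hzG⟩
        rcases List.mem_cons.mp hz with h | h
        · exact h ▸ hzG
        · exact absurd ⟨z, h, hzG⟩ hm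
      rw [pv_foldl_max_const g t (max acc (g y))
        (fun z hz => le_trans (hub z (by simp [hz])) (by omega))]
      omega

-- every element of a ≤-sorted nonempty list is at most its last element
theorem pv_le_getLast (l : List Int) (h : l ≠ []) (hp : l.Pairwise (· ≤ ·)) :
    ∀ y ∈ l, y ≤ l.getLast h := by
  induction l with
  | nil => simp
  | cons x t ih =>
    intro y hy
    cases t with
    | nil =>
      simp at hy; simp [List.getLast, hy]
    | cons z t' =>
      have ht : (z :: t') ≠ [] := by simp
      rw [List.getLast_cons ht]
      rcases List.mem_cons.mp hy with h1 | h1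
      · subst h1
        have hx : ∀ w ∈ z :: t', y ≤ w := (List.pairwise_cons.mp hp).1
        exact hx _ (List.getLast_mem ht)
      · exact ih ht (List.pairwise_cons.mp hp).2 y h1
  
theorem pv_main (divisions : List (List Int)) :
    getSectionSizeDiff divisions = getSectionSizeDiff_alt divisions := by
  simp only [getSectionSizeDiff, getSectionSizeDiff_alt]
  set xs : List Int := divisions.map (fun e => (e.length : Int)) with hxs
  by_cases hnil : xs = []
  · rw [hnil]; decide
  · -- the sorted list, its head m (the minimum) and last H (the maximum)
    have hs : PySem.List.sorted xs (fun x => x) false ≠ [] := by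
      rw [Ne, PySem.List.sorted_eq_nil_iff]; exact hnil
    obtain ⟨m, t, hst⟩ := List.exists_cons_of_ne_nil hs
    have hperm := PySem.List.sorted_perm xs (fun x => x) false
    have hmemxs : ∀ y : Int, y ∈ PySem.List.sorted xs (fun x => x) false ↔ y ∈ xs :=
      fun y => hperm.mem_iff
    have hmin : ∀ y ∈ xs, m ≤ y := PySem.List.key_head_sorted_le xs (fun x => x) hst
    have hub : ∀ y ∈ xs, y ≤ (PySem.List.sorted xs (fun x => x) false).getLast hs :=
      fun y hy => pv_le_getLast _ hs (PySem.List.sorted_pairwise xs (fun x => x)) y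
        ((hmemxs y).mpr hy)
    have hmmem : m ∈ xs := (hmemxs m).mp (by simp [hst])
    have hHmem : (PySem.List.sorted xs (fun x => x) false).getLast hs ∈ xs :=
      (hmemxs _).mp (List.getLast_mem hs)
    set H : Int := (PySem.List.sorted xs (fun x => x) false).getLast hs with hH
    -- B side: s[-1] = H, s[0] = m
    rw [if_neg (by simp [hnil]), PySem.List.pyGetD_neg_one _ _ hs]
    have h0 : PySem.List.pyGetD (PySem.List.sorted xs (fun x => x) false) 0 0 = m := by
      rw [hst]; exact PySem.List.pyGetD_zero_cons m t 0
    rw [h0]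
    -- A side: turn the index folds into folds over xs itself
    have h1 : ∀ x md : Int,
        (PySem.List.pyRange 0 (xs.length : Int) 1).foldl
          (fun a j => if x - PySem.List.pyGetD xs j 0 > a then x - PySem.List.pyGetD xs j 0 else a) md
        = xs.foldl (fun a y => max a (x - y)) md := by
      intro x md
      have e : (fun (a j : Int) =>
          if x - PySem.List.pyGetD xs j 0 > a then x - PySem.List.pyGetD xs j 0 else a)
          = fun a j => max a (x - PySem.List.pyGetD xs j 0) := by
        funext a j; split <;> omega
      rw [e]
      exact PySem.List.foldl_pyRange_zero_pyGetD' xs 0 (fun a y => max a (x - y)) md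
    simp only [h1]
    have h2 : (PySem.List.pyRange 0 (xs.length : Int) 1).foldl
        (fun md i => xs.foldl (fun a y => max a (PySem.List.pyGetD xs i 0 - y)) md) 0
        = xs.foldl (fun md x => xs.foldl (fun a y => max a (x - y)) md) 0 :=
      PySem.List.foldl_pyRange_zero_pyGetD' xs 0
        (fun md x => xs.foldl (fun a y => max a (x - y)) md) 0
    rw [h2]
    -- each inner fold is max md (x - m); the outer fold is max 0 (H - m) = H - m
    have hinner : ∀ x md : Int,
        xs.foldl (fun a y => max a (x - y)) md = max md (x - m) := fun x md =>
      pv_foldl_max_attained (fun y => x - y) xs (x - m) ⟨m, hmmem, rfl⟩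
        (fun y hy => by have := hmin y hy; beta_reduce; omega) md
    simp only [hinner]
    rw [pv_foldl_max_attained (fun x => x - m) xs (H - m) ⟨H, hHmem, rfl⟩
        (fun y hy => by have := hub y hy; beta_reduce; omega) 0]
    have : m ≤ H := hub m hmmem
    omega

-- ===== VERDICT (by name: the statement is the Claim_ definition above) =====
theorem getSectionSizeDiff_spec : Claim_equal_getSectionSizeDiff := by
  intro divisions _
  unfold Spec_getSectionSizeDiff
  exact pv_main divisions
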